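-- pv_equiv track=rewrite | github.com/yu-rp/Dimple | training-code/utils/dataset.py | gen_2d_attention_mask
-- ===== SOURCE A (Python) =====
-- def gen_2d_attention_mask(cut_offs):
--     attn_mask = []
--     length = cut_offs[-1]
--     for cut_off in cut_offs:
--         previous_length = len(attn_mask)
--         attn_mask.extend(
--             [
--                 [1] * cut_off + [0] * (length - cut_off) for _ in range(cut_off - previous_length)
--             ]
--         )
--     return attn_mask
-- ===== SOURCE B (Python) =====
-- def _row(cut_offs, i, length):
--     # the row at index i is governed by the first cutoff exceeding i
--     for c in cut_offs:
--         if c > i: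
--             return [1] * c + [0] * (length - c)
--     return []  # unreachable for i < max(cut_offs)
--
--
-- def gen_2d_attention_mask(cut_offs):
--     length = cut_offs[-1]
--     return [_row(cut_offs, i, length) for i in range(max(cut_offs))]
-- ===== Notes on version B (the rewrite author's own statement) =====
-- stated objective: alternative
-- what changed: B keeps no growing-mask state: it computes each output row independently from its index i by scanning cut_offs for the first cutoff exceeding i, with the row count given directly by max(cut_offs).
import Mathlib
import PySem

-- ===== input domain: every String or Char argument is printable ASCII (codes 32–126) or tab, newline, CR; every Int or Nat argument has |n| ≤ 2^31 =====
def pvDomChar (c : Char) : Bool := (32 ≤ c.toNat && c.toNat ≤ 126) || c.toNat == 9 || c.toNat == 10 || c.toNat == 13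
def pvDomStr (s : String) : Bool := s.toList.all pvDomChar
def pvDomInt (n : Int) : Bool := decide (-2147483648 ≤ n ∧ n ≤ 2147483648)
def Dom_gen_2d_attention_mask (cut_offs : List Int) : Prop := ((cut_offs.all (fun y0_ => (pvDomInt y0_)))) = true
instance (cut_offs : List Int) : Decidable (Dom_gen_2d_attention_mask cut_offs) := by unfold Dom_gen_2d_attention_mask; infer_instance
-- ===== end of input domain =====

-- B keeps no growing-mask state: each row is computed independently from its index i by
-- scanning cut_offs for the first cutoff exceeding i, with max(cut_offs) rows (objective: alternative).
-- Pre_ excludes the empty list, on which Python A raises IndexError fetching the last element.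

-- ===== PORT A =====
-- a row: [1] * cut_off + [0] * (length - cut_off)  (Python clamps negative repeat counts to 0)
def pvRowA (length cut_off : Int) : List Int :=
  List.replicate cut_off.toNat 1 ++ List.replicate (length - cut_off).toNat 0

def gen_2d_attention_mask (cut_offs : List Int) : List (List Int) :=
  match PySem.List.pyGet? cut_offs (-1) with
  | none => []   -- Python raises IndexError here; excluded by Pre_
  | some length =>
    cut_offs.foldl
      (fun attn_mask cut_off =>
        attn_mask ++ List.replicate (cut_off - (attn_mask.length : Int)).toNat (pvRowA length cut_off))
      []

-- ===== PORT B =====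
-- _row: first cutoff c with c > i governs row i  (unreachable fallthrough returns [])
def pvRowFind : List Int → Int → Int → List Int
  | [], _, _ => []
  | c :: rest, i, length =>
    if c > i then List.replicate c.toNat 1 ++ List.replicate (length - c).toNat 0
    else pvRowFind rest i length

def gen_2d_attention_mask_alt (cut_offs : List Int) : List (List Int) :=
  match PySem.List.pyGet? cut_offs (-1) with
  | none => []   -- Python raises IndexError here; excluded by Pre_
  | some length =>
    match PySem.List.max? cut_offs (fun y => y) with
    | none => []   -- Python's max([]) raises; unreachable given the line above
    | some mx => (List.range mx.toNat).map (fun (i : Nat) => pvRowFind cut_offs (i : Int) length)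

-- ===== PRECONDITION & SPEC =====
-- A indexes the last element: the empty list raises IndexError and is excluded.
def Pre_gen_2d_attention_mask (cut_offs : List Int) : Prop := cut_offs ≠ []
instance (cut_offs : List Int) : Decidable (Pre_gen_2d_attention_mask cut_offs) := by
  unfold Pre_gen_2d_attention_mask; infer_instance
def pvWitness_gen_2d_attention_mask : List Int := [2, 3]

def Spec_gen_2d_attention_mask (cut_offs : List Int) (out : List (List Int)) : Prop :=
  out = gen_2d_attention_mask_alt cut_offs
instance (cut_offs : List Int) (out : List (List Int)) : Decidable (Spec_gen_2d_attention_mask cut_offs out) := by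
  unfold Spec_gen_2d_attention_mask; infer_instance

-- ===== CLAIM =====
def Claim_equal_gen_2d_attention_mask : Prop := ∀ (cut_offs : List Int), Dom_gen_2d_attention_mask cut_offs → Pre_gen_2d_attention_mask cut_offs → Spec_gen_2d_attention_mask cut_offs (gen_2d_attention_mask cut_offs)

-- ===== LEMMAS AND PROOFS =====

-- running row count of A's loop, as a Nat fold (used only by the proofs)
def pvR (l : List Int) (m : Nat) : Nat := l.foldl (fun m c => max m c.toNat) m

theorem pvR_ge : ∀ (l : List Int) (m : Nat), m ≤ pvR l m := by
  intro l
  induction l with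
  | nil => intro m; simp [pvR]
  | cons c l ih =>
    intro m
    calc m ≤ max m c.toNat := Nat.le_max_left _ _
    _ ≤ pvR l (max m c.toNat) := ih _
    _ = pvR (c :: l) m := rfl

theorem pvR_int : ∀ (l : List Int) (m : Nat),
    pvR l m = (l.foldl (fun a c => max a c) (m : Int)).toNat := by
  intro l
  induction l with
  | nil => intro m; simp [pvR]
  | cons c l ih =>
    intro m
    have h : ((max m c.toNat : Nat) : Int) = max (m : Int) c := by omega
    show pvR l (max m c.toNat) = (l.foldl (fun a c => max a c) (max (m : Int) c)).toNat
    rw [ih (max m c.toNat), h]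

-- A's fold, started from any accumulator, produces B's indexed rows from index acc.length on.
theorem foldA_eq (length : Int) : ∀ (l : List Int) (acc : List (List Int)),
    l.foldl
      (fun attn_mask cut_off =>
        attn_mask ++ List.replicate (cut_off - (attn_mask.length : Int)).toNat (pvRowA length cut_off))
      acc
    = acc ++ (List.range' acc.length (pvR l acc.length - acc.length)).map
        (fun (i : Nat) => pvRowFind l (i : Int) length) := by
  intro l
  induction l with
  | nil => intro acc; simp [pvR]
  | cons c l ih =>
    intro acc
    set m := acc.length with hm
    by_cases hc : (m : Int) < c
    · -- this cutoff appends rows m..c-1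
      have hcnt : (c - (m : Int)).toNat = c.toNat - m := by omega
      have hmc : m ≤ c.toNat := by omega
      simp only [List.foldl_cons, ← hm]
      rw [ih]
      have hlen : (acc ++ List.replicate (c - (m : Int)).toNat (pvRowA length c)).length = c.toNat := by
        simp [hcnt]; omega
      rw [hlen]
      have hR : pvR (c :: l) m = pvR l c.toNat := by
        show pvR l (max m c.toNat) = pvR l c.toNat
        rw [Nat.max_eq_right hmc]
      rw [hR]
      have hge := pvR_ge l c.toNat
      have h1 : m + (c.toNat - m) = c.toNat := by omega
      have h2 : pvR l c.toNat - m = (c.toNat - m) + (pvR l c.toNat - c.toNat) := by omega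
      rw [h2, ← List.range'_append_1, h1, List.map_append, List.append_assoc]
      have e1 : ∀ i ∈ List.range' m (c.toNat - m),
          pvRowFind (c :: l) (i : Int) length = pvRowA length c := by
        intro i hi
        have hi' := List.mem_range'_1.mp hi
        have hlt : (i : Int) < c := by omega
        simp [pvRowFind, hlt, pvRowA]
      have e2 : ∀ i ∈ List.range' c.toNat (pvR l c.toNat - c.toNat),
          pvRowFind (c :: l) (i : Int) length = pvRowFind l (i : Int) length := by
        intro i hi
        have hi' := List.mem_range'_1.mp hi
        have hlt : ¬ ((i : Int) < c) := by omega
        simp [pvRowFind, hlt]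
      rw [List.map_congr_left e1, List.map_congr_left e2, List.map_const', List.length_range', hcnt]
    · -- this cutoff appends nothing
      have h0 : (c - (m : Int)).toNat = 0 := by omega
      simp only [List.foldl_cons, ← hm, h0, List.replicate_zero, List.append_nil]
      rw [ih, ← hm]
      have hR : pvR (c :: l) m = pvR l m := by
        show pvR l (max m c.toNat) = pvR l m
        rw [Nat.max_eq_left (by omega)]
      rw [hR]
      congr 1
      apply List.map_congr_left
      intro i hi
      have hi' := List.mem_range'_1.mp hi
      have : ¬ ((i : Int) < c) := by omega
      simp [pvRowFind, this]

theorem foldl_max_zero : ∀ (t : List Int) (a : Int),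
    (t.foldl (fun x y => max x y) (max 0 a)).toNat = (t.foldl (fun x y => max x y) a).toNat := by
  intro t
  induction t with
  | nil => intro a; simp; omega
  | cons c t ih =>
    intro a
    have h : max (max 0 a) c = max 0 (max a c) := by omega
    simp only [List.foldl_cons, h]
    exact ih (max a c)

-- ===== VERDICT =====
theorem gen_2d_attention_mask_spec : Claim_equal_gen_2d_attention_mask := by
  intro cut_offs _ hpre
  unfold Spec_gen_2d_attention_mask gen_2d_attention_mask gen_2d_attention_mask_alt
  cases cut_offs with
  | nil => exact absurd rfl hpre
  | cons a t =>
    cases PySem.List.pyGet? (a :: t) (-1) with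
    | none => rfl
    | some length =>
      dsimp only
      rw [PySem.List.max?_id_cons]
      rw [foldA_eq]
      have : pvR (a :: t) 0 = (t.foldl (fun x y => max x y) a).toNat := by
        rw [pvR_int]
        show ((a :: t).foldl (fun x y => max x y) ((0 : Nat) : Int)).toNat = _
        simp only [List.foldl_cons, Int.natCast_zero]
        exact foldl_max_zero t a
      simp [this, List.range_eq_range']
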